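-- pv_equiv track=rewrite | github.com/rishi-new-atlan/MDLHContextExtractor | main.py | find_entity_namespace
-- ===== SOURCE A (Python) =====
-- def find_entity_namespace(namespaces):
--     for ns in namespaces:
--         ns_str = ".".join(ns)
--         if ns_str in ("atlan-ns", "entity_metadata"):
--             return ns_str
--     for ns in namespaces:
--         ns_str = ".".join(ns)
--         if "history" not in ns_str and "gold" not in ns_str:
--             return ns_str
--     return ".".join(namespaces[0])
-- ===== SOURCE B (Python) =====
-- def find_entity_namespace(namespaces):
--     # Right-to-left fold: keep the best candidate seen so far, tagged by whether
--     # it is a special name. Scanning backwards, an earlier special name always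
--     # overwrites, and an earlier clean name overwrites anything non-special, so
--     # the leftmost special wins, else the leftmost clean string.
--     best = None  # (is_special, ns_str)
--     for ns in reversed(namespaces):
--         s = ".".join(ns)
--         if s in ("atlan-ns", "entity_metadata"):
--             best = (True, s)
--         elif (best is None or not best[0]) and "history" not in s and "gold" not in s:
--             best = (False, s)
--     if best is not None:
--         return best[1]
--     return ".".join(namespaces[0])
-- ===== Notes on version B (the rewrite author's own statement) =====
-- stated objective: alternative
-- what changed: Replaces A's two sequential forward scans by a single right-to-left fold that keeps one tagged best candidate (special beats clean, earlier beats later), returning the tag's string at the end instead of early-returning.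
import Mathlib
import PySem

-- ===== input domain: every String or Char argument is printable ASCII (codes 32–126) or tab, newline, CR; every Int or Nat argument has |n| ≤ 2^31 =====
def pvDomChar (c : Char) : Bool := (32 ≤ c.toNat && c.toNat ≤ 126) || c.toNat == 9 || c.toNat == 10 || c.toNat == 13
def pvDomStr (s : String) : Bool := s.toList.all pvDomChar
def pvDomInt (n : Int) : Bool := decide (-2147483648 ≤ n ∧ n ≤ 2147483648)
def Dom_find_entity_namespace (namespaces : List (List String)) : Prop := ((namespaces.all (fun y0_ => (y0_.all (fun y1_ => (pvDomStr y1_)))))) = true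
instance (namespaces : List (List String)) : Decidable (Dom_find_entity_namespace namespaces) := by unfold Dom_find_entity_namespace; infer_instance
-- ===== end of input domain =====

-- B replaces A's two forward scans by one right-to-left fold with a tagged best candidate (objective: alternative).

-- ===== PORT A =====
-- first loop: return ns_str if it is "atlan-ns" or "entity_metadata"
def pvA_loop1 : List (List String) → Option String
  | [] => none
  | ns :: rest =>
    let s := PySem.Str.join "." ns
    if s == "atlan-ns" || s == "entity_metadata" then some s else pvA_loop1 rest

-- second loop: return the first ns_str containing neither "history" nor "gold"
def pvA_loop2 : List (List String) → Option String
  | [] => none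
  | ns :: rest =>
    let s := PySem.Str.join "." ns
    if !(PySem.Str.isIn "history" s) && !(PySem.Str.isIn "gold" s) then some s else pvA_loop2 rest

def find_entity_namespace (namespaces : List (List String)) : String :=
  match pvA_loop1 namespaces with
  | some s => s
  | none =>
    match pvA_loop2 namespaces with
    | some s => s
    | none => PySem.Str.join "." (namespaces.headD [])
    -- namespaces[0]: exact under Pre_ (namespaces ≠ []); on [] Python raises IndexError, excluded by Pre_

-- ===== PORT B =====
-- one step of the reversed loop: fold the current element into the tagged best candidate
def pvB_step (ns : List String) (best : Option (Bool × String)) : Option (Bool × String) :=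
  let s := PySem.Str.join "." ns
  if s == "atlan-ns" || s == "entity_metadata" then some (true, s)
  else if (best.isNone || !((best.getD (false, "")).1)) &&
          !(PySem.Str.isIn "history" s) && !(PySem.Str.isIn "gold" s) then some (false, s)
  else best

def find_entity_namespace_alt (namespaces : List (List String)) : String :=
  match namespaces.foldr pvB_step none with   -- for ns in reversed(namespaces)
  | some (_, s) => s
  | none => PySem.Str.join "." (namespaces.headD [])
    -- namespaces[0]: exact under Pre_ (namespaces ≠ []); on [] Python raises IndexError, excluded by Pre_

-- ===== PRECONDITION & SPEC =====
-- Python A raises IndexError exactly on the empty list (both loops fall through to namespaces[0]).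
def Pre_find_entity_namespace (namespaces : List (List String)) : Prop := namespaces ≠ []
instance (namespaces : List (List String)) : Decidable (Pre_find_entity_namespace namespaces) := by unfold Pre_find_entity_namespace; infer_instance

def pvWitness_find_entity_namespace : List (List String) := [["a", "history"], ["b"]]

def Spec_find_entity_namespace (namespaces : List (List String)) (out : String) : Prop := out = find_entity_namespace_alt namespaces
instance (namespaces : List (List String)) (out : String) : Decidable (Spec_find_entity_namespace namespaces out) := by unfold Spec_find_entity_namespace; infer_instance

-- ===== CLAIM (what is proved, stated in full; the proofs are below) =====
def Claim_equal_find_entity_namespace : Prop := ∀ (namespaces : List (List String)), Dom_find_entity_namespace namespaces → Pre_find_entity_namespace namespaces → Spec_find_entity_namespace namespaces (find_entity_namespace namespaces)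

-- ===== LEMMAS AND PROOFS =====

-- The right fold equals: leftmost special name (tagged true) if any, else leftmost clean name (tagged false).
theorem pvB_foldr_eq (l : List (List String)) :
    l.foldr pvB_step none =
      match pvA_loop1 l with
      | some s => some (true, s)
      | none => match pvA_loop2 l with
        | some s => some (false, s)
        | none => none := by
  induction l with
  | nil => simp [pvA_loop1, pvA_loop2]
  | cons ns rest ih =>
    rw [List.foldr_cons, ih]
    by_cases hspec : (PySem.Str.join "." ns == "atlan-ns" || PySem.Str.join "." ns == "entity_metadata") = true
    · simp [pvB_step, pvA_loop1, hspec]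
    · rw [show pvA_loop1 (ns :: rest) = pvA_loop1 rest from by simp [pvA_loop1, hspec]]
      rw [show pvA_loop2 (ns :: rest) = (if !(PySem.Str.isIn "history" (PySem.Str.join "." ns)) && !(PySem.Str.isIn "gold" (PySem.Str.join "." ns)) then some (PySem.Str.join "." ns) else pvA_loop2 rest) from rfl]
      rcases Bool.eq_false_or_eq_true (!(PySem.Str.isIn "history" (PySem.Str.join "." ns)) && !(PySem.Str.isIn "gold" (PySem.Str.join "." ns))) with hc | hc <;>
        cases h1 : pvA_loop1 rest <;> cases h2 : pvA_loop2 rest <;>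
        simp_all [pvB_step, Option.isNone] <;> (split <;> simp_all)

-- ===== VERDICT (by name: the statement is the Claim_ definition above) =====
theorem find_entity_namespace_spec : Claim_equal_find_entity_namespace := by
  intro namespaces _ _
  unfold Spec_find_entity_namespace find_entity_namespace find_entity_namespace_alt
  rw [pvB_foldr_eq]
  cases h1 : pvA_loop1 namespaces with
  | some s => simp
  | none => cases h2 : pvA_loop2 namespaces <;> simp
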